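-- pv_equiv track=rewrite | github.com/meltWLAN/SETO | seto_versal/coordinator/director.py | _group_intentions
-- ===== SOURCE A (Python) =====
-- def _group_intentions(intentions):
--     """
--     Group intentions by symbol and direction
--
--     Args:
--         intentions (list): List of trading intentions
--
--     Returns:
--         dict: Grouped intentions by symbol and direction
--     """
--     grouped = {}
--
--     for intention in intentions:
--         symbol = intention.get('symbol')
--         direction = intention.get('direction')
--
--         if not symbol or not direction:
--             continue
--
--         if symbol not in grouped:
--             grouped[symbol] = {}
--
--         if direction not in grouped[symbol]:
--             grouped[symbol][direction] = []
--
--         grouped[symbol][direction].append(intention)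
--
--     return grouped
-- ===== SOURCE B (Python) =====
-- def _group_intentions(intentions):
--     """Group intentions by symbol and direction (filter + ordered-dedup + comprehensions)."""
--     valid = [it for it in intentions
--              if it.get('symbol') and it.get('direction')]
--     symbols = list(dict.fromkeys(it['symbol'] for it in valid))
--     grouped = {}
--     for s in symbols:
--         mine = [it for it in valid if it['symbol'] == s]
--         dirs = list(dict.fromkeys(it['direction'] for it in mine))
--         grouped[s] = {d: [it for it in mine if it['direction'] == d] for d in dirs}
--     return grouped
-- ===== Notes on version B (the rewrite author's own statement) =====
-- stated objective: idiomatic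
-- what changed: Replaces A's single pass that incrementally mutates a nested dict with a declarative pipeline: filter the valid intentions once, dedup the symbols (and per-symbol directions) with dict.fromkeys, and build the nested result with comprehensions.
import Mathlib
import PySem

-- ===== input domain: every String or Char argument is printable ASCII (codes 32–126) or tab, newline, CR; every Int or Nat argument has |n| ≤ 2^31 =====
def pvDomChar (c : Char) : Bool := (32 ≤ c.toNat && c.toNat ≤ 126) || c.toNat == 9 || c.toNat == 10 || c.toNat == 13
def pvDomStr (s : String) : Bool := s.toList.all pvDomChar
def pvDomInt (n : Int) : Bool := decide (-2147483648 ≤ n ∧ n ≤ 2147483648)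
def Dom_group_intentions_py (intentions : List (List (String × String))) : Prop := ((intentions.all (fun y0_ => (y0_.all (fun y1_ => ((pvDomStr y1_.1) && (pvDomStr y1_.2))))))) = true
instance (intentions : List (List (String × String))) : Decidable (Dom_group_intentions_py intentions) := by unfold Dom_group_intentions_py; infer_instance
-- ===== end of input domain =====

-- B replaces A's incremental nested-dict building with filter + ordered-dedup + comprehensions (objective: idiomatic/alternative; same asymptotics not claimed faster).

-- Shared primitive: intention.get(k) — dict lookup, first match (PySem.Dict on the assoc list).
def pvGetKey (it : List (String × String)) (k : String) : Option String :=
  (PySem.Dict.mk it).get? k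

-- Python truthiness of an Optional[str]: falsy iff missing or "".
def pvTruthy (o : Option String) : Bool := !(o.getD "" == "")

-- ===== PORT A =====
-- one iteration of A's loop body (the 'continue' guard, the two setdefault-style ifs, the append)
def pvStepA (g : PySem.Dict String (PySem.Dict String (List (List (String × String)))))
    (intention : List (String × String)) :
    PySem.Dict String (PySem.Dict String (List (List (String × String)))) :=
  let symbol := pvGetKey intention "symbol"
  let direction := pvGetKey intention "direction"
  if !(pvTruthy symbol) || !(pvTruthy direction) then g
  else
    let s := symbol.getD ""
    let d := direction.getD ""
    let g := if g.contains s then g else g.insert s PySem.Dict.empty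
    let inner := g.getD s PySem.Dict.empty
    let inner := if inner.contains d then inner else inner.insert d []
    g.insert s (inner.insert d (inner.getD d [] ++ [intention]))

def group_intentions_py (intentions : List (List (String × String))) :
    List (String × List (String × List (List (String × String)))) :=
  ((intentions.foldl pvStepA PySem.Dict.empty).items.map (fun p => (p.1, p.2.items)))

-- ===== PORT B =====
-- Source B: valid filter, then dict.fromkeys dedup of symbols, then per-symbol comprehensions.
def pvValid (it : List (String × String)) : Bool :=
  pvTruthy (pvGetKey it "symbol") && pvTruthy (pvGetKey it "direction")

-- it['symbol'] / it['direction']; on valid intentions the key is present, so getD "" is exact there.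
def pvSym (it : List (String × String)) : String := (pvGetKey it "symbol").getD ""
def pvDir (it : List (String × String)) : String := (pvGetKey it "direction").getD ""

def group_intentions_py_alt (intentions : List (List (String × String))) :
    List (String × List (String × List (List (String × String)))) :=
  let valid := intentions.filter pvValid
  let symbols := PySem.List.dedup (valid.map pvSym)
  symbols.map (fun s =>
    let mine := valid.filter (fun it => pvSym it == s)
    let dirs := PySem.List.dedup (mine.map pvDir)
    (s, dirs.map (fun d => (d, mine.filter (fun it => pvDir it == d)))))

-- ===== PRECONDITION & SPEC =====
def Spec_group_intentions_py (intentions : List (List (String × String))) (out : List (String × List (String × List (List (String × String))))) : Prop := out = group_intentions_py_alt intentions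
instance (intentions : List (List (String × String))) (out : List (String × List (String × List (List (String × String))))) : Decidable (Spec_group_intentions_py intentions out) := by
  unfold Spec_group_intentions_py
  haveI : DecidableEq (List (String × List (List (String × String)))) := inferInstance
  infer_instance

-- ===== CLAIM (what is proved, stated in full; the proofs are below) =====
def Claim_equal_group_intentions_py : Prop := ∀ (intentions : List (List (String × String))), Dom_group_intentions_py intentions → Spec_group_intentions_py intentions (group_intentions_py intentions)

-- ===== LEMMAS AND PROOFS =====

-- the per-symbol inner grouping of a valid list v (B's inner comprehension)
def pvInner (v : List (List (String × String))) (s : String) :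
    List (String × List (List (String × String))) :=
  (PySem.List.dedup ((v.filter (fun it => pvSym it == s)).map pvDir)).map
    (fun d => (d, (v.filter (fun it => pvSym it == s)).filter (fun it => pvDir it == d)))

-- the nested dict A's loop maintains, in closed form over the valid prefix v
def pvNest (v : List (List (String × String))) :
    PySem.Dict String (PySem.Dict String (List (List (String × String)))) :=
  PySem.Dict.mk ((PySem.List.dedup (v.map pvSym)).map
    (fun s => (s, PySem.Dict.mk (pvInner v s))))

theorem pvDedup_append {α : Type} [BEq α] [LawfulBEq α] (l : List α) (a : α) :
    PySem.List.dedup (l ++ [a]) =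
      if a ∈ PySem.List.dedup l then PySem.List.dedup l else PySem.List.dedup l ++ [a] := by
  simp only [PySem.List.dedup, PySem.Set.ofList_append, PySem.Set.update_cons,
    PySem.Set.update_nil, PySem.Set.add, PySem.Set.contains]
  by_cases h : a ∈ PySem.Set.ofList l
  · simp [h]
  · simp [h]

theorem pvFilter_nil_of_not_mem_dedup {α β : Type} [BEq β] [LawfulBEq β]
    (v : List α) (f : α → β) (s : β) (h : s ∉ PySem.List.dedup (v.map f)) :
    v.filter (fun it => f it == s) = [] := by
  rw [List.filter_eq_nil_iff]
  intro it hit hbeq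
  exact h ((PySem.List.mem_dedup _ _).2 (List.mem_map.2 ⟨it, hit, (eq_of_beq hbeq).symm ▸ rfl⟩))

theorem pvInner_ne (v : List (List (String × String))) (x : List (String × String))
    (s : String) (h : pvSym x ≠ s) : pvInner (v ++ [x]) s = pvInner v s := by
  have hb : (pvSym x == s) = false := by simp [h]
  simp [pvInner, List.filter_append, hb]

-- keys / getD / contains of a dict literal built by mapping over a key list
theorem pvKeys_mk_map {ν : Type} (M : List String) (f : String → ν) :
    (PySem.Dict.mk (M.map (fun s => (s, f s)))).keys = M := by
  simp [PySem.Dict.keys_mk, List.map_map, Function.comp_def]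

theorem pvContains_mk_map {ν : Type} (M : List String) (f : String → ν) (s : String) :
    (PySem.Dict.mk (M.map (fun s => (s, f s)))).contains s = decide (s ∈ M) := by
  by_cases h : s ∈ M
  · rw [decide_eq_true h]
    exact (PySem.Dict.contains_iff_mem_keys _ _).2 (by rw [pvKeys_mk_map]; exact h)
  · rw [decide_eq_false h]
    by_contra hc
    rw [Bool.not_eq_false] at hc
    exact h (by have := (PySem.Dict.contains_iff_mem_keys _ s).1 hc; rwa [pvKeys_mk_map] at this)

theorem pvGetD_mk_map {ν : Type} (M : List String) (f : String → ν) (hnd : M.Nodup)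
    (s : String) (hs : s ∈ M) (d0 : ν) :
    (PySem.Dict.mk (M.map (fun s => (s, f s)))).getD s d0 = f s := by
  apply PySem.Dict.getD_of_mem_items
  · exact List.mem_map.2 ⟨s, hs, rfl⟩
  · rw [pvKeys_mk_map]; exact hnd

-- replace-in-place of a literal dict's items is a pointwise map over the (Nodup) key list
theorem pvItems_insert_mem {ν : Type} (M : List String) (f : String → ν)
    (s : String) (hs : s ∈ M) (w : ν) :
    ((PySem.Dict.mk (M.map (fun s => (s, f s)))).insert s w).items =
      M.map (fun s0 => if s0 = s then (s, w) else (s0, f s0)) := by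
  rw [PySem.Dict.items_insert_of_contains _ _ (by rw [pvContains_mk_map]; simpa using hs)]
  simp only [List.map_map]
  apply List.map_congr_left
  intro s0 _
  by_cases h : s0 = s <;> simp [Function.comp, h]

theorem pvItems_insert_fresh {ν : Type} (M : List String) (f : String → ν)
    (s : String) (hs : s ∉ M) (w : ν) :
    ((PySem.Dict.mk (M.map (fun s => (s, f s)))).insert s w).items =
      M.map (fun s0 => (s0, f s0)) ++ [(s, w)] := by
  rw [PySem.Dict.items_insert_of_not_contains _ _ (by rw [pvContains_mk_map]; simpa using hs)]

-- one loop iteration on the inner (per-symbol) dict, in closed form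
theorem pvInner_step (v : List (List (String × String))) (x : List (String × String)) :
    ((if (PySem.Dict.mk (pvInner v (pvSym x))).contains (pvDir x) then
        PySem.Dict.mk (pvInner v (pvSym x))
      else (PySem.Dict.mk (pvInner v (pvSym x))).insert (pvDir x) []).insert (pvDir x)
        (((if (PySem.Dict.mk (pvInner v (pvSym x))).contains (pvDir x) then
            PySem.Dict.mk (pvInner v (pvSym x))
          else (PySem.Dict.mk (pvInner v (pvSym x))).insert (pvDir x) []).getD (pvDir x) []) ++ [x]))
    = PySem.Dict.mk (pvInner (v ++ [x]) (pvSym x)) := by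
  have hmine : (v ++ [x]).filter (fun it => pvSym it == pvSym x)
      = v.filter (fun it => pvSym it == pvSym x) ++ [x] := by
    simp [List.filter_append]
  by_cases hd : pvDir x ∈
      PySem.List.dedup ((v.filter (fun it => pvSym it == pvSym x)).map pvDir)
  · have hc : (PySem.Dict.mk (pvInner v (pvSym x))).contains (pvDir x) = true := by
      rw [pvInner, pvContains_mk_map, decide_eq_true hd]
    rw [hc]
    simp only [if_true]
    have hget : (PySem.Dict.mk (pvInner v (pvSym x))).getD (pvDir x) []
        = (v.filter (fun it => pvSym it == pvSym x)).filter (fun it => pvDir it == pvDir x) := by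
      rw [pvInner]
      exact pvGetD_mk_map _ _ (PySem.List.nodup_dedup _) _ hd _
    rw [hget]
    apply PySem.Dict.ext
    rw [pvInner]
    rw [pvItems_insert_mem _ _ _ hd]
    show _ = pvInner (v ++ [x]) (pvSym x)
    rw [pvInner, hmine, List.map_append]
    simp only [List.map_cons, List.map_nil]
    rw [pvDedup_append, if_pos (by simpa using hd)]
    apply List.map_congr_left
    intro d0 hd0
    by_cases h0 : d0 = pvDir x
    · subst h0
      simp [List.filter_append]
    · have hb : (pvDir x == d0) = false := by simp [Ne.symm h0]
      simp [h0, List.filter_append, hb]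
  · have hc : (PySem.Dict.mk (pvInner v (pvSym x))).contains (pvDir x) = false := by
      rw [pvInner, pvContains_mk_map, decide_eq_false hd]
    rw [hc]
    simp only [Bool.false_eq_true, if_false]
    rw [PySem.Dict.getD_insert_self, PySem.Dict.insert_insert_self]
    apply PySem.Dict.ext
    rw [pvInner]
    rw [pvItems_insert_fresh _ _ _ hd]
    show _ = pvInner (v ++ [x]) (pvSym x)
    rw [pvInner, hmine, List.map_append]
    simp only [List.map_cons, List.map_nil]
    rw [pvDedup_append, if_neg (by simpa using hd)]
    rw [List.map_append]
    congr 1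
    · apply List.map_congr_left
      intro d0 hd0
      have h0 : d0 ≠ pvDir x := fun h => hd (h ▸ hd0)
      have hb : (pvDir x == d0) = false := by simp [Ne.symm h0]
      simp [List.filter_append, hb]
    · have hnil : (v.filter (fun it => pvSym it == pvSym x)).filter
          (fun it => pvDir it == pvDir x) = [] :=
        pvFilter_nil_of_not_mem_dedup _ pvDir _ hd
      simp only [List.map_cons, List.map_nil, List.filter_append, hnil]
      simp

theorem pvStepA_nest (v : List (List (String × String))) (x : List (String × String))
    (hx : pvValid x = true) : pvStepA (pvNest v) x = pvNest (v ++ [x]) := by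
  rw [pvValid, Bool.and_eq_true] at hx
  have hguard : (!(pvTruthy (pvGetKey x "symbol")) || !(pvTruthy (pvGetKey x "direction"))) = false := by
    rw [hx.1, hx.2]; rfl
  have e1 : (pvGetKey x "symbol").getD "" = pvSym x := rfl
  have e2 : (pvGetKey x "direction").getD "" = pvDir x := rfl
  simp only [pvStepA, hguard, Bool.false_eq_true, if_false, e1, e2]
  by_cases hs : pvSym x ∈ PySem.List.dedup (v.map pvSym)
  · have hc : (pvNest v).contains (pvSym x) = true := by
      rw [pvNest, pvContains_mk_map, decide_eq_true hs]
    rw [hc]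
    simp only [if_true]
    have hget : (pvNest v).getD (pvSym x) PySem.Dict.empty
        = PySem.Dict.mk (pvInner v (pvSym x)) := by
      rw [pvNest]
      exact pvGetD_mk_map _ _ (PySem.List.nodup_dedup _) _ hs _
    rw [hget, pvInner_step v x]
    apply PySem.Dict.ext
    rw [pvNest]
    rw [pvItems_insert_mem _ _ _ hs]
    show _ = (pvNest (v ++ [x])).items
    rw [pvNest, List.map_append]
    simp only [List.map_cons, List.map_nil]
    rw [pvDedup_append, if_pos (by simpa using hs)]
    apply List.map_congr_left
    intro s0 hs0
    by_cases h0 : s0 = pvSym x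
    · subst h0; simp
    · rw [pvInner_ne v x s0 (Ne.symm h0)]
      simp [h0]
  · have hc : (pvNest v).contains (pvSym x) = false := by
      rw [pvNest, pvContains_mk_map, decide_eq_false hs]
    rw [hc]
    simp only [Bool.false_eq_true, if_false]
    rw [PySem.Dict.getD_insert_self, PySem.Dict.contains_empty]
    simp only [Bool.false_eq_true, if_false]
    rw [PySem.Dict.getD_insert_self, PySem.Dict.insert_insert_self,
      PySem.Dict.insert_insert_self]
    apply PySem.Dict.ext
    rw [pvNest]
    rw [pvItems_insert_fresh _ _ _ hs]
    show _ = (pvNest (v ++ [x])).items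
    rw [pvNest, List.map_append]
    simp only [List.map_cons, List.map_nil]
    rw [pvDedup_append, if_neg (by simpa using hs)]
    rw [List.map_append]
    congr 1
    · apply List.map_congr_left
      intro s0 hs0
      have h0 : s0 ≠ pvSym x := fun h => hs (h ▸ hs0)
      rw [pvInner_ne v x s0 (Ne.symm h0)]
    · have hnil : v.filter (fun it => pvSym it == pvSym x) = [] :=
        pvFilter_nil_of_not_mem_dedup _ pvSym _ hs
      have hmine2 : (v ++ [x]).filter (fun it => pvSym it == pvSym x) = [x] := by
        rw [List.filter_append, hnil]; simp
      have hone : PySem.Set.ofList [pvDir x] = [pvDir x] := by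
        simpa [PySem.List.dedup] using pvDedup_append ([] : List String) (pvDir x)
      have hdict : PySem.Dict.mk (pvInner (v ++ [x]) (pvSym x))
          = PySem.Dict.empty.insert (pvDir x) ([] ++ [x]) := by
        apply PySem.Dict.ext
        rw [PySem.Dict.items_insert_of_not_contains _ _ (by simp)]
        rw [pvInner, hmine2]
        simp [hone, PySem.Dict.empty]
      simp only [List.map_cons, List.map_nil]
      rw [hdict]

theorem pvFoldA_nest (xs : List (List (String × String))) :
    ∀ v, xs.foldl pvStepA (pvNest v) = pvNest (v ++ xs.filter pvValid) := by
  induction xs with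
  | nil => intro v; simp
  | cons x xs ih =>
    intro v
    by_cases hx : pvValid x = true
    · simp only [List.foldl_cons, pvStepA_nest v x hx, ih (v ++ [x]),
        List.filter_cons, hx, if_pos]
      simp
    · have hx' : pvValid x = false := by simpa using hx
      have hskip : pvStepA (pvNest v) x = pvNest v := by
        have hguard : (!(pvTruthy (pvGetKey x "symbol")) || !(pvTruthy (pvGetKey x "direction"))) = true := by
          have : ¬(pvTruthy (pvGetKey x "symbol") = true ∧ pvTruthy (pvGetKey x "direction") = true) := by
            intro hcc
            rw [pvValid, hcc.1, hcc.2] at hx'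
            simp at hx'
          rcases not_and_or.1 this with h | h <;> simp [Bool.not_eq_true] at h <;> simp [h]
        simp only [pvStepA, hguard]
        simp
      simp [List.foldl_cons, hskip, ih v, hx']

-- ===== VERDICT (by name: the statement is the Claim_ definition above) =====
theorem group_intentions_py_spec : Claim_equal_group_intentions_py := by
  intro intentions _
  unfold Spec_group_intentions_py group_intentions_py group_intentions_py_alt
  have h0 : (PySem.Dict.empty :
      PySem.Dict String (PySem.Dict String (List (List (String × String))))) = pvNest [] := rfl
  rw [h0, pvFoldA_nest intentions []]
  simp [pvNest, pvInner, List.map_map, Function.comp]
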